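-- pv_equiv track=rewrite | github.com/amandawindhu/TUBES-AKA | aka.py | cek_stok_rekursif
-- ===== SOURCE A (Python) =====
-- def cek_stok_rekursif(inventori, barang, items=None):
--     if items is None:
--         items = list(inventori.items())
--     if not items:
--         return 0
--     item, data = items[0]
--     if item == barang:
--         return data['stok']
--     return cek_stok_rekursif(inventori, barang, items[1:])
-- ===== SOURCE B (Python) =====
-- def cek_stok_rekursif(inventori, barang, items=None):
--     if items is None:
--         items = list(inventori.items())
--     # Build a hash index once; reversing first makes the FIRST occurrence of a
--     # duplicate key win, matching first-match semantics.
--     lookup = dict(reversed(items))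
--     data = lookup.get(barang)
--     if data is None:
--         return 0
--     return data['stok']
-- ===== Notes on version B (the rewrite author's own statement) =====
-- stated objective: alternative
-- what changed: Replaces the tail recursion with slicing by a hash index built once from the reversed item list (first occurrence wins) followed by a single dict lookup.
-- outside the precondition, e.g. on cek_stok_rekursif({'x': {}}, 'x', None): A raises KeyError, B raises KeyError
import Mathlib
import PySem

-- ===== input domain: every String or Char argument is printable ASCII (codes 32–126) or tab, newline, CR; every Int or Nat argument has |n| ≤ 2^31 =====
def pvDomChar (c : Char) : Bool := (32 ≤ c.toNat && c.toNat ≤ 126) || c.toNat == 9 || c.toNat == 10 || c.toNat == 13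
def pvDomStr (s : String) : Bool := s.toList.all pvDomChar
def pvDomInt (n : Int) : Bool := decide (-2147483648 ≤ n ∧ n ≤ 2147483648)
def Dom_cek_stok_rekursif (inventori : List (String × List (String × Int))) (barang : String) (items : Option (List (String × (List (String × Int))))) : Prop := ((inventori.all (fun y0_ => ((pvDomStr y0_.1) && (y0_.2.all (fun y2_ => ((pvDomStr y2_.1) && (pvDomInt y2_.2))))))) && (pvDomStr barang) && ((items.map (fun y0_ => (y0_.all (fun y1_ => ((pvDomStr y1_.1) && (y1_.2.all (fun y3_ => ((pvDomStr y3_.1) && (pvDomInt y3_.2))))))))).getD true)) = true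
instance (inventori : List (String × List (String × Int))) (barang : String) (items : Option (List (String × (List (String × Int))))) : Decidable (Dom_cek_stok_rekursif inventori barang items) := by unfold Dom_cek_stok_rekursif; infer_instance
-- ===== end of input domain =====

-- B replaces A's tail recursion over items[1:] with a dict index built once from the
-- reversed item list plus a single lookup (objective: alternative decomposition).

-- ===== PORT A =====
-- helper: A's recursion over the current items list ('items[1:]' is the tail)
def cekStokGo (barang : String) : List (String × List (String × Int)) → Int
  | [] => 0
  | (item, data) :: rest =>
    if item == barang then ((PySem.Dict.mk data).get? "stok").getD 0
    else cekStokGo barang rest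

def cek_stok_rekursif (inventori : List (String × List (String × Int))) (barang : String) (items : Option (List (String × (List (String × Int))))) : Int :=
  -- 'if items is None: items = list(inventori.items())'
  cekStokGo barang (items.getD inventori)

-- ===== PORT B =====
def cek_stok_rekursif_alt (inventori : List (String × List (String × Int))) (barang : String) (items : Option (List (String × (List (String × Int))))) : Int :=
  let its := items.getD inventori
  -- 'lookup = dict(reversed(items))'
  let lookup := PySem.Dict.ofList its.reverse
  -- 'data = lookup.get(barang)'
  match lookup.get? barang with
  | none => 0
  | some data => ((PySem.Dict.mk data).get? "stok").getD 0

-- ===== PRECONDITION & SPEC =====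
-- Pre_ excludes exactly the inputs where Python A raises KeyError: the first item pair
-- whose key equals barang carries a dict without the key 'stok'.
def Pre_cek_stok_rekursif (inventori : List (String × List (String × Int))) (barang : String) (items : Option (List (String × (List (String × Int))))) : Prop :=
  ∀ p ∈ (items.getD inventori).find? (fun q => q.1 == barang),
    ((PySem.Dict.mk p.2).get? "stok").isSome = true
instance (inventori : List (String × List (String × Int))) (barang : String) (items : Option (List (String × (List (String × Int))))) : Decidable (Pre_cek_stok_rekursif inventori barang items) := by unfold Pre_cek_stok_rekursif; infer_instance
def pvWitness_cek_stok_rekursif : (List (String × List (String × Int))) × String × (Option (List (String × (List (String × Int))))) :=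
  ([("apel", [("stok", 7)]), ("jeruk", [("stok", 3)])], "jeruk", none)

def Spec_cek_stok_rekursif (inventori : List (String × List (String × Int))) (barang : String) (items : Option (List (String × (List (String × Int))))) (out : Int) : Prop := out = cek_stok_rekursif_alt inventori barang items
instance (inventori : List (String × List (String × Int))) (barang : String) (items : Option (List (String × (List (String × Int))))) (out : Int) : Decidable (Spec_cek_stok_rekursif inventori barang items out) := by unfold Spec_cek_stok_rekursif; infer_instance

-- ===== CLAIM (what is proved, stated in full; the proofs are below) =====
def Claim_equal_cek_stok_rekursif : Prop := ∀ (inventori : List (String × List (String × Int))) (barang : String) (items : Option (List (String × (List (String × Int))))), Dom_cek_stok_rekursif inventori barang items → Pre_cek_stok_rekursif inventori barang items → Spec_cek_stok_rekursif inventori barang items (cek_stok_rekursif inventori barang items)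

-- ===== LEMMAS AND PROOFS =====

-- A's recursion computes the first-match characterisation.
theorem cekStokGo_eq_find (barang : String) (l : List (String × List (String × Int))) :
    cekStokGo barang l =
      match l.find? (fun q => q.1 == barang) with
      | none => 0
      | some p => ((PySem.Dict.mk p.2).get? "stok").getD 0 := by
  induction l with
  | nil => rfl
  | cons p rest ih =>
    obtain ⟨item, data⟩ := p
    by_cases h : item == barang
    · simp [cekStokGo, List.find?, h]
    · simp only [cekStokGo, List.find?, h, Bool.false_eq_true, if_false]
      exact ih

theorem ofList_eq_foldl {κ ν : Type} [BEq κ] (l : List (κ × ν)) :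
    PySem.Dict.ofList l = l.foldl (fun d p => d.insert p.1 p.2) PySem.Dict.empty := rfl

-- dict(reversed(l)) looks up the FIRST matching pair of l.
theorem get?_ofList_reverse {ν : Type} (l : List (String × ν)) (k : String) :
    (PySem.Dict.ofList l.reverse).get? k = (l.find? (fun q => q.1 == k)).map (·.2) := by
  induction l with
  | nil => rfl
  | cons p rest ih =>
    have hfold : PySem.Dict.ofList ((p :: rest).reverse)
        = (PySem.Dict.ofList rest.reverse).insert p.1 p.2 := by
      rw [ofList_eq_foldl, ofList_eq_foldl, List.reverse_cons, List.foldl_append]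
      rfl
    rw [hfold, PySem.Dict.get?_insert]
    by_cases h : k = p.1
    · have h' : (p.1 == k) = true := by simp [h]
      simp [List.find?, h]
    · have h' : (p.1 == k) = false := by simp [Ne.symm h]
      simp [List.find?, h', h, ih]

-- ===== VERDICT (by name: the statement is the Claim_ definition above) =====
theorem cek_stok_rekursif_spec : Claim_equal_cek_stok_rekursif := by
  intro inventori barang items _ _
  unfold Spec_cek_stok_rekursif cek_stok_rekursif cek_stok_rekursif_alt
  rw [cekStokGo_eq_find]
  simp only [get?_ofList_reverse]
  cases h : (items.getD inventori).find? (fun q => q.1 == barang) <;> simp
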